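-- pv_equiv track=rewrite | github.com/Karakean/Systems-of-Linear-Equations | main.py | create_triangular_matrix
-- ===== SOURCE A (Python) =====
-- def create_triangular_matrix(src_matrix, isLower):
--     N = len(src_matrix)
--     matrix = [[0 for _ in range(N)] for _ in range(N)]
--     if isLower:
--         for i in range(1, N):
--             for j in range(i):
--                 matrix[i][j] = src_matrix[i][j]
--     else:
--         for i in range(1, N):
--             for j in range(i):
--                 matrix[j][i] = src_matrix[j][i]
--     return matrix
-- ===== SOURCE B (Python) =====
-- def create_triangular_matrix(src_matrix, isLower):
--     N = len(src_matrix)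
--     if isLower:
--         return [row[:i] + [0] * (N - i) for i, row in enumerate(src_matrix)]
--     return [[0] * (i + 1) + row[i + 1:N] for i, row in enumerate(src_matrix)]
-- ===== Notes on version B (the rewrite author's own statement) =====
-- stated objective: alternative
-- what changed: Builds each output row wholesale by list slicing and zero-padding (row[:i] + [0]*(N-i), resp. [0]*(i+1) + row[i+1:N]) instead of zero-initialising an NxN grid and overwriting triangular cells one by one.
import Mathlib
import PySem

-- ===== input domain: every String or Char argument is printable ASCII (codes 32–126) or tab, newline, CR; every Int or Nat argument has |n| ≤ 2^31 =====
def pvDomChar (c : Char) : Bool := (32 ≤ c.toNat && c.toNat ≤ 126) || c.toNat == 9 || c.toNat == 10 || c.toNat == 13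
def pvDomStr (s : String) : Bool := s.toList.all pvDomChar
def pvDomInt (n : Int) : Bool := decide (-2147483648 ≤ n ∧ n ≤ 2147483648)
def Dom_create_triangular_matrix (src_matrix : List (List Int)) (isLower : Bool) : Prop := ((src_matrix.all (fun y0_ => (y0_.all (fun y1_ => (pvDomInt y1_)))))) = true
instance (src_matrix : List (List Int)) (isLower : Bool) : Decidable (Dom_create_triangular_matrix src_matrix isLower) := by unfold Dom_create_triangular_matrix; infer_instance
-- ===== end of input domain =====

-- B builds each output row wholesale by slicing and zero-padding instead of A's
-- zero-init NxN grid plus per-cell triangular overwrite; same return values on Pre_.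

-- src_matrix[i][j] for in-range nonnegative i, j (the only reads A performs inside Pre_);
-- the getD defaults are never reached on admitted inputs.
def pvGetCell (src : List (List Int)) (i j : Nat) : Int := (src.getD i []).getD j 0

-- matrix[i][j] = v ; here i, j are always < N = matrix size, where List.set is exact Python.
def pvSetCell (m : List (List Int)) (i j : Nat) (v : Int) : List (List Int) :=
  m.set i ((m.getD i []).set j v)

-- ===== PORT A =====
def create_triangular_matrix (src_matrix : List (List Int)) (isLower : Bool) : List (List Int) :=
  let N := src_matrix.length
  let matrix := (List.range N).map (fun _ => (List.range N).map (fun _ => (0 : Int)))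
  if isLower then
    (List.range' 1 (N - 1)).foldl   -- range(1, N)
      (fun m i => (List.range i).foldl (fun m j => pvSetCell m i j (pvGetCell src_matrix i j)) m)
      matrix
  else
    (List.range' 1 (N - 1)).foldl   -- range(1, N)
      (fun m i => (List.range i).foldl (fun m j => pvSetCell m j i (pvGetCell src_matrix j i)) m)
      matrix

-- ===== PORT B =====
def create_triangular_matrix_alt (src_matrix : List (List Int)) (isLower : Bool) : List (List Int) :=
  let N := src_matrix.length
  if isLower then
    (PySem.List.enumerate src_matrix 0).map (fun p =>
      PySem.List.slice p.2 none (some p.1) ++ List.replicate ((N : Int) - p.1).toNat (0 : Int))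
  else
    (PySem.List.enumerate src_matrix 0).map (fun p =>
      List.replicate (p.1 + 1).toNat (0 : Int) ++ PySem.List.slice p.2 (some (p.1 + 1)) (some (N : Int)))

-- ===== PRECONDITION & SPEC =====
-- Pre_ excludes exactly the inputs on which A raises IndexError: ragged matrices whose
-- rows are too short for the strict-triangle reads A performs.
def Pre_create_triangular_matrix (src_matrix : List (List Int)) (isLower : Bool) : Prop :=
  if isLower then
    ∀ i < src_matrix.length, i ≤ (src_matrix.getD i []).length
  else
    ∀ j < src_matrix.length - 1, src_matrix.length ≤ (src_matrix.getD j []).length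
instance (src_matrix : List (List Int)) (isLower : Bool) : Decidable (Pre_create_triangular_matrix src_matrix isLower) := by
  unfold Pre_create_triangular_matrix; infer_instance

def pvWitness_create_triangular_matrix : List (List Int) × Bool := ([[1, 2], [3, 4]], true)

def Spec_create_triangular_matrix (src_matrix : List (List Int)) (isLower : Bool) (out : List (List Int)) : Prop := out = create_triangular_matrix_alt src_matrix isLower
instance (src_matrix : List (List Int)) (isLower : Bool) (out : List (List Int)) : Decidable (Spec_create_triangular_matrix src_matrix isLower out) := by unfold Spec_create_triangular_matrix; infer_instance

-- ===== CLAIM (what is proved, stated in full; the proofs are below) =====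
def Claim_equal_create_triangular_matrix : Prop := ∀ (src_matrix : List (List Int)) (isLower : Bool), Dom_create_triangular_matrix src_matrix isLower → Pre_create_triangular_matrix src_matrix isLower → Spec_create_triangular_matrix src_matrix isLower (create_triangular_matrix src_matrix isLower)

-- ===== LEMMAS AND PROOFS =====

def pvMapGrid (N : Nat) (g : Nat → Nat → Int) : List (List Int) :=
  (List.range N).map (fun i => (List.range N).map (fun j => g i j))

def pvApply (src : List (List Int)) (m : List (List Int)) (ps : List (Nat × Nat)) : List (List Int) :=
  ps.foldl (fun m p => pvSetCell m p.1 p.2 (pvGetCell src p.1 p.2)) m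

theorem pvMapGrid_congr {N : Nat} {g g' : Nat → Nat → Int}
    (h : ∀ i < N, ∀ j < N, g i j = g' i j) : pvMapGrid N g = pvMapGrid N g' := by
  unfold pvMapGrid
  refine List.map_congr_left (fun i hi => ?_)
  refine List.map_congr_left (fun j hj => ?_)
  exact h i (List.mem_range.mp hi) j (List.mem_range.mp hj)

theorem set_map_range (N j : Nat) (v : Int) (h : Nat → Int) :
    ((List.range N).map h).set j v
      = (List.range N).map (fun b => if b = j then v else h b) := by
  apply List.ext_getElem
  · simp
  · intro b h1 h2
    by_cases hb : j = b <;> simp [hb, eq_comm]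

theorem pvSetCell_mapGrid (N i j : Nat) (v : Int) (g : Nat → Nat → Int)
    (hi : i < N) :
    pvSetCell (pvMapGrid N g) i j v
      = pvMapGrid N (fun a b => if a = i ∧ b = j then v else g a b) := by
  unfold pvSetCell pvMapGrid
  have hrow : (((List.range N).map (fun i => (List.range N).map (fun j => g i j))).getD i [])
      = (List.range N).map (fun j => g i j) := by
    rw [List.getD_eq_getElem _ _ (by simpa using hi)]
    simp
  rw [hrow]
  apply List.ext_getElem
  · simp
  · intro a h1 h2
    simp only [List.getElem_set, List.getElem_map, List.getElem_range]
    by_cases ha : a = i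
    · subst ha
      rw [if_pos rfl, set_map_range]
      apply List.map_congr_left
      intro b hb
      by_cases hbj : b = j <;> simp [hbj]
    · rw [if_neg (fun h => ha h.symm)]
      apply List.map_congr_left
      intro b hb
      simp [ha]

theorem pvApply_mapGrid (src : List (List Int)) (N : Nat) (ps : List (Nat × Nat)) (g : Nat → Nat → Int)
    (hps : ∀ p ∈ ps, p.1 < N) :
    pvApply src (pvMapGrid N g) ps
      = pvMapGrid N (fun a b => if (a, b) ∈ ps then pvGetCell src a b else g a b) := by
  induction ps generalizing g with
  | nil => exact (pvMapGrid_congr (by simp)).symm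
  | cons p t ih =>
    have h1 : pvApply src (pvMapGrid N g) (p :: t)
        = pvApply src (pvSetCell (pvMapGrid N g) p.1 p.2 (pvGetCell src p.1 p.2)) t := rfl
    rw [h1, pvSetCell_mapGrid N p.1 p.2 _ g (hps p (by simp)),
        ih _ (fun q hq => hps q (by simp [hq]))]
    apply pvMapGrid_congr
    intro a _ b _
    by_cases ht : (a, b) ∈ t
    · simp [ht]
    · by_cases hp : a = p.1 ∧ b = p.2
      · obtain ⟨h3, h4⟩ := hp
        subst h3; subst h4
        simp [ht]
      · have hne : ¬ (a, b) = p := fun h5 => hp (by cases h5; exact ⟨rfl, rfl⟩)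
        simp [ht, hp, hne]

theorem foldl_nested (src : List (List Int)) (m : List (List Int)) (l : List Nat)
    (h : Nat → List (Nat × Nat)) :
    l.foldl (fun m i => pvApply src m (h i)) m = pvApply src m (l.flatMap h) := by
  induction l generalizing m with
  | nil => rfl
  | cons a t ih => simp only [List.foldl_cons, List.flatMap_cons, pvApply, List.foldl_append]; exact ih _

theorem inner_lower (src : List (List Int)) (m : List (List Int)) (i : Nat) :
    (List.range i).foldl (fun m j => pvSetCell m i j (pvGetCell src i j)) m
      = pvApply src m ((List.range i).map (fun j => (i, j))) := by
  simp [pvApply, List.foldl_map]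

theorem inner_upper (src : List (List Int)) (m : List (List Int)) (i : Nat) :
    (List.range i).foldl (fun m j => pvSetCell m j i (pvGetCell src j i)) m
      = pvApply src m ((List.range i).map (fun j => (j, i))) := by
  simp [pvApply, List.foldl_map]

-- under Pre_ (lower), the grid form of A equals B's slice-and-pad row construction
theorem grid_eq_alt_lower (src : List (List Int))
    (hpre : ∀ i < src.length, i ≤ (src.getD i []).length) :
    pvMapGrid src.length (fun a b => if b < a then pvGetCell src a b else 0)
      = (PySem.List.enumerate src 0).map (fun p =>
          PySem.List.slice p.2 none (some p.1) ++ List.replicate ((src.length : Int) - p.1).toNat (0 : Int)) := by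
  apply List.ext_getElem
  · simp [pvMapGrid, PySem.List.length_enumerate]
  · intro i h1 h2
    have hiN : i < src.length := by simpa [pvMapGrid] using h1
    have hrow : (src.getD i []) = src[i] := List.getD_eq_getElem _ _ hiN
    have hlen : i ≤ src[i].length := by rw [← hrow]; exact hpre i hiN
    simp only [pvMapGrid, List.getElem_map, List.getElem_range,
      PySem.List.getElem_enumerate]
    have hslice : PySem.List.slice src[i] none (some ((0 : Int) + i)) = src[i].take i := by
      rw [zero_add, PySem.List.slice_to_natCast]
    rw [hslice]
    apply List.ext_getElem
    · simp only [List.length_map, List.length_range, List.length_append,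
        List.length_take, List.length_replicate]
      omega
    · intro j hj1 hj2
      simp only [List.getElem_map, List.getElem_range]
      by_cases hji : j < i
      · rw [List.getElem_append_left (by simp; omega), List.getElem_take,
          if_pos hji]
        have e1 : src[i]? = some src[i] := List.getElem?_eq_getElem hiN
        have e2 : src[i][j]? = some src[i][j] := List.getElem?_eq_getElem (lt_of_lt_of_le hji hlen)
        simp [pvGetCell, List.getD, e1, e2]
      · rw [List.getElem_append_right (by simp; omega), List.getElem_replicate,
          if_neg hji]
  
-- under Pre_ (upper), the grid form of A equals B's pad-and-slice row construction
theorem grid_eq_alt_upper (src : List (List Int))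
    (hpre : ∀ j < src.length - 1, src.length ≤ (src.getD j []).length) :
    pvMapGrid src.length (fun a b => if a < b then pvGetCell src a b else 0)
      = (PySem.List.enumerate src 0).map (fun p =>
          List.replicate (p.1 + 1).toNat (0 : Int) ++ PySem.List.slice p.2 (some (p.1 + 1)) (some (src.length : Int))) := by
  apply List.ext_getElem
  · simp [pvMapGrid, PySem.List.length_enumerate]
  · intro i h1 h2
    have hiN : i < src.length := by simpa [pvMapGrid] using h1
    have hrow : (src.getD i []) = src[i] := List.getD_eq_getElem _ _ hiN
    simp only [pvMapGrid, List.getElem_map, List.getElem_range,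
      PySem.List.getElem_enumerate]
    have hslice : PySem.List.slice src[i] (some ((0 : Int) + i + 1)) (some (src.length : Int))
        = (src[i].drop (i + 1)).take (src.length - (i + 1)) := by
      rw [zero_add]
      have : ((i : Int) + 1) = ((i + 1 : Nat) : Int) := by push_cast; ring
      rw [this, PySem.List.slice_natCast]
    rw [hslice]
    have hcnt : (((0 : Int) + i + 1)).toNat = i + 1 := by omega
    rw [hcnt]
    have htail : ((src[i].drop (i + 1)).take (src.length - (i + 1))).length
        = src.length - (i + 1) := by
      by_cases hl : i < src.length - 1
      · have := hpre i hl
        rw [hrow] at this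
        simp; omega
      · have : src.length - (i + 1) = 0 := by omega
        simp [this]
    apply List.ext_getElem
    · simp only [List.length_append, List.length_replicate, htail, List.length_map,
        List.length_range]
      omega
    · intro j hj1 hj2
      simp only [List.getElem_map, List.getElem_range]
      by_cases hij : i < j
      · have hil : i < src.length - 1 := by simp at hj1; omega
        have hlenrow := hpre i hil
        rw [hrow] at hlenrow
        rw [List.getElem_append_right (by simp; omega), if_pos hij]
        rw [List.getElem_take, List.getElem_drop]
        have hjlt : j < src.length := by simpa using hj1
        simp only [List.length_replicate]
        have hidx : src[i][i + 1 + (j - (i + 1))]'(by omega) = src[i][j]'(by omega) := by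
          apply Option.some.inj
          rw [← List.getElem?_eq_getElem, ← List.getElem?_eq_getElem]
          congr 1
          omega
        rw [hidx]
        have e1 : src[i]? = some src[i] := List.getElem?_eq_getElem hiN
        have e2 : src[i][j]? = some src[i][j] := List.getElem?_eq_getElem (by omega : j < src[i].length)
        simp [pvGetCell, List.getD, e1, e2]
      · rw [List.getElem_append_left (by simp; omega), List.getElem_replicate,
          if_neg hij]

-- ===== VERDICT (by name: the statement is the Claim_ definition above) =====
theorem create_triangular_matrix_spec : Claim_equal_create_triangular_matrix := by
  intro src isLower _ hpre
  unfold Spec_create_triangular_matrix create_triangular_matrix create_triangular_matrix_alt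
  have hinit : (List.range src.length).map (fun _ => (List.range src.length).map (fun _ => (0 : Int)))
      = pvMapGrid src.length (fun _ _ => 0) := rfl
  cases isLower with
  | true =>
    simp only [hinit]
    have hrw : ∀ m : List (List Int),
        (List.range' 1 (src.length - 1)).foldl
          (fun m i => (List.range i).foldl (fun m j => pvSetCell m i j (pvGetCell src i j)) m) m
        = pvApply src m ((List.range' 1 (src.length - 1)).flatMap (fun i => (List.range i).map (fun j => (i, j)))) := by
      intro m
      rw [← foldl_nested]
      simp only [inner_lower]
    simp only [if_true]
    rw [hrw, pvApply_mapGrid]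
    · rw [pvMapGrid_congr (g' := fun a b => if b < a then pvGetCell src a b else 0)
        (by
          intro a ha b hb
          have hmem : ((a, b) ∈ (List.range' 1 (src.length - 1)).flatMap (fun i => (List.range i).map (fun j => (i, j))))
              ↔ (b < a) := by
            simp only [List.mem_flatMap, List.mem_range'_1, List.mem_map, List.mem_range]
            constructor
            · rintro ⟨i, ⟨h1, h2⟩, j, hj, he⟩
              cases he; omega
            · intro hba; exact ⟨a, by omega, b, hba, rfl⟩
          simp [hmem])]
      exact grid_eq_alt_lower src (by simpa [Pre_create_triangular_matrix] using hpre)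
    · intro p hp
      simp only [List.mem_flatMap, List.mem_range'_1, List.mem_map, List.mem_range] at hp
      obtain ⟨i, ⟨h1, h2⟩, j, hj, he⟩ := hp
      cases he; simp; omega
  | false =>
    simp only [hinit]
    have hrw : ∀ m : List (List Int),
        (List.range' 1 (src.length - 1)).foldl
          (fun m i => (List.range i).foldl (fun m j => pvSetCell m j i (pvGetCell src j i)) m) m
        = pvApply src m ((List.range' 1 (src.length - 1)).flatMap (fun i => (List.range i).map (fun j => (j, i)))) := by
      intro m
      rw [← foldl_nested]
      simp only [inner_upper]
    simp only [Bool.false_eq_true, if_false]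
    rw [hrw, pvApply_mapGrid]
    · rw [pvMapGrid_congr (g' := fun a b => if a < b then pvGetCell src a b else 0)
        (by
          intro a ha b hb
          have hmem : ((a, b) ∈ (List.range' 1 (src.length - 1)).flatMap (fun i => (List.range i).map (fun j => (j, i))))
              ↔ (a < b ∧ b < src.length) := by
            simp only [List.mem_flatMap, List.mem_range'_1, List.mem_map, List.mem_range]
            constructor
            · rintro ⟨i, ⟨h1, h2⟩, j, hj, he⟩
              cases he; omega
            · rintro ⟨hab, hbN⟩; exact ⟨b, by omega, a, hab, rfl⟩
          simp only [hmem]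
          by_cases hab : a < b <;> simp [hab, hb])]
      exact grid_eq_alt_upper src (by simpa [Pre_create_triangular_matrix] using hpre)
    · intro p hp
      simp only [List.mem_flatMap, List.mem_range'_1, List.mem_map, List.mem_range] at hp
      obtain ⟨i, ⟨h1, h2⟩, j, hj, he⟩ := hp
      cases he; simp; omega
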